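-- pv_equiv track=rewrite | github.com/pypi-data/pypi-mirror-403 | packages/iqm-benchmarks/iqm_benchmarks-2.55-py3-none-any.whl/iqm/benchmarks/randomized_benchmarking/randomized_benchmarking_common.py | relabel_qubits_array_from_zero
-- ===== SOURCE A (Python) =====
-- from typing import Any, Callable, Dict, List, Optional, Sequence, Tuple, cast
--
-- def relabel_qubits_array_from_zero(
--     arr: List[List[int]], separate_registers: bool = False, reversed_arr: bool = False
-- ) -> List[List[int]]:
--     """Helper function to relabel a qubits array to an increasingly ordered one starting from zero
--     e.g., [[2,3], [5], [7,8]]  ->  [[0,1], [2], [3,4]]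
--     Note: this assumes the input array is sorted in increasing order!
--
--     Args:
--         arr (List[List[int]]): the qubits array to relabel.
--         separate_registers (bool): whether the clbits were generated in separate registers.
--                 * This has the effect of skipping one value in between each sublist, e.g., [[2,3], [5], [7,8]]  ->  [[0,1], [3], [5,6]]
--                 * Default is False.
--         reversed_arr (bool): whether the input array is reversed.
--                 * This has the effect of reversing the output array, e.g., [[2,3], [5,7], [8]] -> [[0], [1,2], [3,4]]
--                 * Default is False.
--
--     Returns:
--         List[List[int]]: the relabeled qubits array.
--     """
--     # Flatten the original array
--     flat_list = [item for sublist in arr for item in sublist]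
--     # Generate a list of ordered numbers with the same length as the flattened array
--     # If separate_registers is True, ordered_indices has to skip one value in between each sublist (as if the clbits were generated in separate registers)
--     # e.g. [[2,3], [5], [7,8]] -> [[0,1],[3],[5,6]] if separate_registers=True
--     ordered_indices = list(range(len(flat_list) + len(arr) - 1)) if separate_registers else list(range(len(flat_list)))
--     # Reconstruct the list of lists structure
--     result = []
--     index = 0
--     for sublist in reversed(arr) if reversed_arr else arr:
--         result.append(ordered_indices[index : index + len(sublist)])
--         index += len(sublist) + 1 if separate_registers else len(sublist)
--     return result
-- ===== SOURCE B (Python) =====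
-- from typing import List
--
--
-- def relabel_qubits_array_from_zero(
--     arr: List[List[int]], separate_registers: bool = False, reversed_arr: bool = False
-- ) -> List[List[int]]:
--     """Relabel a sorted qubits array to consecutive indices starting from zero.
--
--     Stateless closed form: each output sublist i is computed independently as
--     range(start(i), start(i) + len(order[i])) where
--     start(i) = (total length of the sublists preceding i) + i * step,
--     with step = 1 exactly when separate_registers (one skipped value per gap).
--     No flattening, no global index table, no running counter."""
--     order = arr[::-1] if reversed_arr else arr
--     step = 1 if separate_registers else 0
--
--     def start(i):
--         return sum(len(s) for s in order[:i]) + i * step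
--
--     return [list(range(start(i), start(i) + len(order[i]))) for i in range(len(order))]
-- ===== Notes on version B (the rewrite author's own statement) =====
-- stated objective: alternative
-- what changed: Replaces A's stateful pipeline (flatten the array, materialize a global ordered_indices list, then slice it while advancing a running index) with a stateless closed form that computes each output sublist independently as range(start(i), start(i)+len) where start(i) is the sum of the preceding sublists' lengths plus i when separate_registers.
import Mathlib
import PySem

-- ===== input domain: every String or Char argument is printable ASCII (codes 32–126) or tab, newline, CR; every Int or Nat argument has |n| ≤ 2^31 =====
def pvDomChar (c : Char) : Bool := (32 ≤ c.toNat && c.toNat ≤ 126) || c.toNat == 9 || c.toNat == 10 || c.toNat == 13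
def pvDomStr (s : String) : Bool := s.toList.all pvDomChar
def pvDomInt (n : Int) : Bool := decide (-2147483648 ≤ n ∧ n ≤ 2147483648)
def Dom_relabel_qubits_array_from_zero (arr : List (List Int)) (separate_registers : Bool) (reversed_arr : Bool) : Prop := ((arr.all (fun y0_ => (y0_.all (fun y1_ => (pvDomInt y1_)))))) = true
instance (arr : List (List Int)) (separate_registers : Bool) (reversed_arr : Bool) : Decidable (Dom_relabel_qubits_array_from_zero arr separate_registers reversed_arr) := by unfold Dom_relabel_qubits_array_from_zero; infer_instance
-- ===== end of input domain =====

-- B replaces A's stateful flatten/global-index-table/slice pipeline with a stateless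
-- closed form computing each output sublist independently (alternative, not faster).

-- ===== PORT A =====
-- the for-loop over `reversed(arr) if reversed_arr else arr`, with state (result, index);
-- result is produced head-first (append at each step = cons here, recursing on the rest)
def relabelA_loop (ordered : List Int) (sep : Bool) : List (List Int) → Int → List (List Int)
  | [], _ => []
  | sub :: rest, index =>
      PySem.List.slice ordered (some index) (some (index + (sub.length : Int))) ::
        relabelA_loop ordered sep rest (index + (if sep then (sub.length : Int) + 1 else (sub.length : Int)))

def relabel_qubits_array_from_zero (arr : List (List Int)) (separate_registers : Bool) (reversed_arr : Bool) : List (List Int) :=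
  let flat_list : List Int := arr.flatMap (fun sublist => sublist)
  let ordered_indices : List Int :=
    if separate_registers then PySem.List.pyRange 0 ((flat_list.length : Int) + (arr.length : Int) - 1) 1
    else PySem.List.pyRange 0 (flat_list.length : Int) 1
  relabelA_loop ordered_indices separate_registers (if reversed_arr then arr.reverse else arr) 0

-- ===== PORT B =====
-- start(i) = sum(len(s) for s in order[:i]) + i * step  (order[:i] with 0 ≤ i = take i)
def relabelB_start (order : List (List Int)) (step : Int) (i : Nat) : Int :=
  (((order.take i).map List.length).sum : Int) + (i : Int) * step

-- the comprehension over range(len(order)); order[i] with 0 ≤ i < len = getD [] here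
def relabel_qubits_array_from_zero_alt (arr : List (List Int)) (separate_registers : Bool) (reversed_arr : Bool) : List (List Int) :=
  let order := if reversed_arr then arr.reverse else arr
  let step : Int := if separate_registers then 1 else 0
  (List.range order.length).map (fun i =>
    PySem.List.pyRange (relabelB_start order step i)
      (relabelB_start order step i + ((order[i]?.getD []).length : Int)) 1)

-- ===== PRECONDITION & SPEC =====
def Spec_relabel_qubits_array_from_zero (arr : List (List Int)) (separate_registers : Bool) (reversed_arr : Bool) (out : List (List Int)) : Prop := out = relabel_qubits_array_from_zero_alt arr separate_registers reversed_arr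
instance (arr : List (List Int)) (separate_registers : Bool) (reversed_arr : Bool) (out : List (List Int)) : Decidable (Spec_relabel_qubits_array_from_zero arr separate_registers reversed_arr out) := by unfold Spec_relabel_qubits_array_from_zero; infer_instance

-- ===== CLAIM (what is proved, stated in full; the proofs are below) =====
def Claim_equal_relabel_qubits_array_from_zero : Prop := ∀ (arr : List (List Int)) (separate_registers : Bool) (reversed_arr : Bool), Dom_relabel_qubits_array_from_zero arr separate_registers reversed_arr → Spec_relabel_qubits_array_from_zero arr separate_registers reversed_arr (relabel_qubits_array_from_zero arr separate_registers reversed_arr)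

-- ===== LEMMAS AND PROOFS =====

-- a contiguous slice of range(N) is a range
lemma slice_pyRange (N j n : Nat) (h : j + n ≤ N) :
    PySem.List.slice (PySem.List.pyRange 0 (N : Int) 1) (some (j : Int)) (some ((j : Int) + (n : Int)))
      = PySem.List.pyRange (j : Int) ((j : Int) + (n : Int)) 1 := by
  rw [PySem.List.slice_natCast_add]
  apply List.ext_getElem
  · simp only [List.length_take, List.length_drop, PySem.List.length_pyRange_one]
    omega
  · intro k h1 h2
    have hk : k < n := by simpa [PySem.List.length_pyRange_one] using h2
    have hjk : j + k < N := by omega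
    simp [PySem.List.getElem_pyRange_one]

-- A's loop with index j over lst equals the closed-form map with base offset j
lemma loop_eq_map (sep : Bool) (N : Nat) :
    ∀ (lst : List (List Int)) (j : Nat),
      j + (lst.map List.length).sum + (if sep then lst.length else 0) ≤ N + (if sep then 1 else 0) →
      relabelA_loop (PySem.List.pyRange 0 (N : Int) 1) sep lst (j : Int)
        = (List.range lst.length).map (fun i =>
            PySem.List.pyRange ((j : Int) + relabelB_start lst (if sep then 1 else 0) i)
              (((j : Int) + relabelB_start lst (if sep then 1 else 0) i) + ((lst[i]?.getD []).length : Int)) 1)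
  | [], j, _ => rfl
  | sub :: rest, j, h => by
    simp only [List.map_cons, List.sum_cons, List.length_cons] at h
    have hjs : j + sub.length ≤ N := by cases sep <;> simp_all <;> omega
    have hrec := loop_eq_map sep N rest (j + (if sep then sub.length + 1 else sub.length))
      (by cases sep <;> simp_all <;> omega)
    have hcast : ((j : Int) + (if sep then (sub.length : Int) + 1 else (sub.length : Int)))
        = (((j + (if sep then sub.length + 1 else sub.length) : Nat)) : Int) := by
      cases sep <;> push_cast <;> ring
    simp only [relabelA_loop]
    rw [slice_pyRange N j sub.length hjs, hcast, hrec]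
    simp only [List.length_cons, List.range_succ_eq_map, List.map_cons, List.map_map]
    congr 1
    · simp [relabelB_start]
    · apply List.map_congr_left
      intro i _
      have hs : ((j + (if sep then sub.length + 1 else sub.length) : Nat) : Int)
            + relabelB_start rest (if sep then 1 else 0) i
          = (j : Int) + relabelB_start (sub :: rest) (if sep then 1 else 0) (i + 1) := by
        simp only [relabelB_start, List.take_succ_cons, List.map_cons, List.sum_cons]
        cases sep <;> simp only [if_true, if_false, Bool.false_eq_true, ite_true, ite_false] <;>
          push_cast <;> ring
      simp only [Function.comp]
      rw [hs]
      rfl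

-- ===== VERDICT (by name: the statement is the Claim_ definition above) =====
theorem relabel_qubits_array_from_zero_spec : Claim_equal_relabel_qubits_array_from_zero := by
  intro arr sep rev _
  unfold Spec_relabel_qubits_array_from_zero relabel_qubits_array_from_zero relabel_qubits_array_from_zero_alt
  simp only []
  set lst := if rev then arr.reverse else arr with hlst
  have hlen : lst.length = arr.length := by cases rev <;> simp [hlst]
  have hsum : (lst.map List.length).sum = ((arr.flatMap (fun s => s)).length : Nat) := by
    cases rev <;> simp [hlst]
  have hfin : ∀ (N : Nat),
      (lst.map List.length).sum + (if sep then lst.length else 0) ≤ N + (if sep then 1 else 0) →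
      relabelA_loop (PySem.List.pyRange 0 (N : Int) 1) sep lst 0
        = (List.range lst.length).map (fun i =>
            PySem.List.pyRange (relabelB_start lst (if sep then 1 else 0) i)
              (relabelB_start lst (if sep then 1 else 0) i + ((lst[i]?.getD []).length : Int)) 1) := by
    intro N hN
    have := loop_eq_map sep N lst 0 (by simpa using hN)
    simpa using this
  cases sep with
  | false =>
    have := hfin ((arr.flatMap (fun s => s)).length) (by simp [hsum])
    simpa using this
  | true =>
    by_cases harr : arr = []
    · subst harr; cases rev <;> rfl
    · have hpos : 1 ≤ arr.length := by
        cases arr with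
        | nil => exact absurd rfl harr
        | cons a as => simp
      set F := (arr.flatMap (fun s => s)).length with hF
      have hN : (F : Int) + (arr.length : Int) - 1 = ((F + arr.length - 1 : Nat) : Int) := by
        push_cast [Nat.cast_sub (by omega : 1 ≤ F + arr.length)]
        ring
      rw [hN]
      have := hfin (F + arr.length - 1) (by simp [hsum, hlen]; omega)
      simpa using this
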